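-- pv_equiv track=rewrite | github.com/HermesADD/AnalisisDeAlgoritmos | Practica03/p03.py | generate_k_zigzag
-- ===== SOURCE A (Python) =====
-- def generate_k_zigzag(n, k):
--     """
--     Genera una secuencia k-zig-zag de tamaño n
--     """
--     sequence = list(range(1, n + 1))
--     result = []
--     left = 0
--     right = n - 1
--     while left <= right:
--         # Tomar k elementos de izquierda a derecha
--         for _ in range(k):
--             if left <= right:
--                 result.append(sequence[left])
--                 left += 1
--         # Tomar k elementos de derecha a izquierda
--         for _ in range(k):
--             if left <= right:
--                 result.append(sequence[right])
--                 right -= 1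
--     return result
-- ===== SOURCE B (Python) =====
-- def generate_k_zigzag(n, k):
--     """
--     Genera una secuencia k-zig-zag de tamaño n
--     """
--     result = []
--     for i in range(n):
--         c, r = divmod(i, k)
--         half = c // 2
--         if c % 2 == 0:
--             result.append(half * k + r + 1)
--         else:
--             result.append(n - half * k - r)
--     return result
-- ===== Notes on version B (the rewrite author's own statement) =====
-- stated objective: alternative
-- what changed: B replaces A's two-pointer chunk-consuming while loop over a prebuilt array by a closed-form position-to-value map: for each output index i it computes divmod(i,k) and derives the value directly (even chunk -> (c//2)*k+r+1, odd chunk -> n-(c//2)*k-r), in one pass over range(n) with no pointers or intermediate list.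
import Mathlib
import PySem

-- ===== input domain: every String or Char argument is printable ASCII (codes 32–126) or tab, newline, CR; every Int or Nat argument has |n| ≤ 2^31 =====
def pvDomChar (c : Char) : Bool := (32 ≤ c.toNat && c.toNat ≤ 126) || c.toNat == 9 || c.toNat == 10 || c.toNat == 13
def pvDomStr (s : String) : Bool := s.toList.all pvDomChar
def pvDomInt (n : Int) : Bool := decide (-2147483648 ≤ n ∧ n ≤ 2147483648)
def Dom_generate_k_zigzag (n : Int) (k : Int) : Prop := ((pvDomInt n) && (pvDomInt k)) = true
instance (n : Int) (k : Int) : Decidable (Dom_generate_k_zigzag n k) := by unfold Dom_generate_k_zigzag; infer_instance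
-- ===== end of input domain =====

-- B computes each output position directly by a closed-form divmod formula (which zigzag chunk the
-- index falls in determines its value) instead of A's two-pointer chunked consumption of a prebuilt
-- array (objective: alternative).

-- ===== PORT A =====
-- inner 'for _ in range(k)' forward pass: state (result, left); the lookup is ported with pyGetD
-- (the index is always in range on reachable states, so Python never raises here)
def pvA_fwd (seq : List Int) (right : Int) : Nat → Int → List Int → List Int × Int
  | 0, left, acc => (acc, left)
  | c + 1, left, acc =>
    if left ≤ right then pvA_fwd seq right c (left + 1) (acc ++ [PySem.List.pyGetD seq left 0])
    else pvA_fwd seq right c left acc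

-- inner 'for _ in range(k)' backward pass: state (result, right)
def pvA_bwd (seq : List Int) (left : Int) : Nat → Int → List Int → List Int × Int
  | 0, right, acc => (acc, right)
  | c + 1, right, acc =>
    if left ≤ right then pvA_bwd seq left c (right - 1) (acc ++ [PySem.List.pyGetD seq right 0])
    else pvA_bwd seq left c right acc

-- the while loop; fuel n.toNat+1 suffices on Pre_ (each entered iteration with k ≥ 1 consumes ≥ 1 element)
def pvA_loop (seq : List Int) (k : Int) : Nat → Int → Int → List Int → List Int
  | 0, _, _, acc => acc
  | fuel + 1, left, right, acc =>
    if left ≤ right then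
      let p1 := pvA_fwd seq right k.toNat left acc
      let p2 := pvA_bwd seq p1.2 k.toNat right p1.1
      pvA_loop seq k fuel p1.2 p2.2 p2.1
    else acc

def generate_k_zigzag (n : Int) (k : Int) : List Int :=
  pvA_loop (PySem.List.pyRange 1 (n + 1) 1) k (n.toNat + 1) 0 (n - 1) []

-- ===== PORT B =====
-- loop body of Source B: c, r = divmod(i, k); half = c // 2; even chunk / odd chunk value
def pvB_body (n : Int) (k : Int) (i : Int) : Int :=
  let c := PySem.Int.floordiv i k
  let r := PySem.Int.mod i k
  let half := PySem.Int.floordiv c 2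
  if PySem.Int.mod c 2 = 0 then half * k + r + 1 else n - half * k - r

def generate_k_zigzag_alt (n : Int) (k : Int) : List Int :=
  (PySem.List.pyRange 0 n 1).foldl (fun acc i => acc ++ [pvB_body n k i]) []

-- ===== PRECONDITION & SPEC =====
-- Pre_ excludes k ≤ 0 with n ≥ 1: there the Python A never terminates (the while loop makes no progress)
def Pre_generate_k_zigzag (n : Int) (k : Int) : Prop := n ≤ 0 ∨ 1 ≤ k
instance (n : Int) (k : Int) : Decidable (Pre_generate_k_zigzag n k) := by unfold Pre_generate_k_zigzag; infer_instance
def pvWitness_generate_k_zigzag : Int × Int := (10, 3)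

def Spec_generate_k_zigzag (n : Int) (k : Int) (out : List Int) : Prop := out = generate_k_zigzag_alt n k
instance (n : Int) (k : Int) (out : List Int) : Decidable (Spec_generate_k_zigzag n k out) := by unfold Spec_generate_k_zigzag; infer_instance

-- ===== CLAIM (what is proved, stated in full; the proofs are below) =====
def Claim_equal_generate_k_zigzag : Prop := ∀ (n : Int) (k : Int), Dom_generate_k_zigzag n k → Pre_generate_k_zigzag n k → Spec_generate_k_zigzag n k (generate_k_zigzag n k)

-- ===== LEMMAS AND PROOFS =====

-- proof-only helper: A's loop rewritten as front/back chunk extensions (lo = left+1, hi = right+1)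
def pvChunks (k : Int) : Nat → Int → Int → List Int → List Int
  | 0, _, _, acc => acc
  | fuel + 1, lo, hi, acc =>
    if lo ≤ hi then
      let t1 := min k (hi - lo + 1)
      let acc1 := acc ++ PySem.List.pyRange lo (lo + t1) 1
      let lo1 := lo + t1
      let t2 := min k (hi - lo1 + 1)
      let acc2 := acc1 ++ PySem.List.pyRange hi (hi - t2) (-1)
      pvChunks k fuel lo1 (hi - t2) acc2
    else acc

-- the sequence list(range(1, n+1)) looked up at 0 ≤ i < n gives i + 1
theorem pv_seq_get (n i : Int) (h0 : 0 ≤ i) (h1 : i < n) :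
    PySem.List.pyGetD (PySem.List.pyRange 1 (n + 1) 1) i 0 = i + 1 := by
  have hlen : (PySem.List.pyRange 1 (n + 1) 1).length = (n + 1 - 1).toNat :=
    PySem.List.length_pyRange_one 1 (n + 1)
  have hi' : (i : Int) < ((PySem.List.pyRange 1 (n + 1) 1).length : Int) := by
    rw [hlen]; omega
  rw [PySem.List.pyGetD_eq_getElem _ 0 h0 hi']
  rw [PySem.List.getElem_pyRange_one]
  omega

-- forward inner loop = one ascending chunk
theorem pv_fwd_chunk (n : Int) (c : Nat) : ∀ (left right : Int) (acc : List Int),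
    0 ≤ left → right < n →
    pvA_fwd (PySem.List.pyRange 1 (n + 1) 1) right c left acc =
      (acc ++ PySem.List.pyRange (left + 1) (left + 1 + max 0 (min (c : Int) (right - left + 1))) 1,
       left + max 0 (min (c : Int) (right - left + 1))) := by
  induction c with
  | zero =>
    intro left right acc _ _
    have h0 : max 0 (min ((0 : Nat) : Int) (right - left + 1)) = 0 := by omega
    rw [h0]
    simp [pvA_fwd]
  | succ c ih =>
    intro left right acc hl hr
    by_cases h : left ≤ right
    · rw [pvA_fwd, if_pos h, ih (left + 1) right _ (by omega) hr,
        pv_seq_get n left hl (by omega)]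
      have hT : max 0 (min (((c + 1 : Nat)) : Int) (right - left + 1)) =
          max 0 (min (c : Int) (right - (left + 1) + 1)) + 1 := by push_cast; omega
      simp only [Prod.mk.injEq]
      refine ⟨?_, by rw [hT]; ring⟩
      rw [hT]
      have e : left + 1 + (max 0 (min (c : Int) (right - (left + 1) + 1)) + 1)
          = left + 1 + 1 + max 0 (min (c : Int) (right - (left + 1) + 1)) := by ring
      rw [e]
      conv_rhs => rw [PySem.List.pyRange_one_cons
        (show left + 1 < left + 1 + 1 + max 0 (min (c : Int) (right - (left + 1) + 1)) from by omega)]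
      simp
    · rw [pvA_fwd, if_neg h, ih left right acc hl hr]
      have hT : max 0 (min (((c + 1 : Nat)) : Int) (right - left + 1)) = 0 := by omega
      have hT' : max 0 (min ((c : Nat) : Int) (right - left + 1)) = 0 := by omega
      rw [hT, hT']

-- backward inner loop = one descending chunk
theorem pv_bwd_chunk (n : Int) (c : Nat) : ∀ (left right : Int) (acc : List Int),
    0 ≤ left → right < n →
    pvA_bwd (PySem.List.pyRange 1 (n + 1) 1) left c right acc =
      (acc ++ PySem.List.pyRange (right + 1) (right + 1 - max 0 (min (c : Int) (right - left + 1))) (-1),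
       right - max 0 (min (c : Int) (right - left + 1))) := by
  induction c with
  | zero =>
    intro left right acc _ _
    have h0 : max 0 (min ((0 : Nat) : Int) (right - left + 1)) = 0 := by omega
    rw [h0]
    simp [pvA_bwd]
  | succ c ih =>
    intro left right acc hl hr
    by_cases h : left ≤ right
    · rw [pvA_bwd, if_pos h, ih left (right - 1) _ hl (by omega),
        pv_seq_get n right (by omega) hr]
      have hT : max 0 (min (((c + 1 : Nat)) : Int) (right - left + 1)) =
          max 0 (min (c : Int) (right - 1 - left + 1)) + 1 := by push_cast; omega
      simp only [Prod.mk.injEq]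
      refine ⟨?_, by rw [hT]; ring⟩
      rw [hT]
      have e : right + 1 - (max 0 (min (c : Int) (right - 1 - left + 1)) + 1)
          = right - 1 + 1 - max 0 (min (c : Int) (right - 1 - left + 1)) := by ring
      rw [e]
      conv_rhs => rw [PySem.List.pyRange_neg_one_cons
        (show right - 1 + 1 - max 0 (min (c : Int) (right - 1 - left + 1)) < right + 1 from by omega)]
      have e2 : right + 1 - 1 = right - 1 + 1 := by ring
      rw [e2]
      simp
    · rw [pvA_bwd, if_neg h, ih left right acc hl hr]
      have hT : max 0 (min (((c + 1 : Nat)) : Int) (right - left + 1)) = 0 := by omega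
      have hT' : max 0 (min ((c : Nat) : Int) (right - left + 1)) = 0 := by omega
      rw [hT, hT']

-- A's loop and the chunk loop agree step for step under lo = left+1, hi = right+1
theorem pv_loop_eq (n k : Int) (hk : 1 ≤ k) : ∀ (fuel : Nat) (left right : Int) (acc : List Int),
    0 ≤ left → right < n →
    pvA_loop (PySem.List.pyRange 1 (n + 1) 1) k fuel left right acc =
      pvChunks k fuel (left + 1) (right + 1) acc := by
  intro fuel
  induction fuel with
  | zero => intro left right acc _ _; rfl
  | succ fuel ih =>
    intro left right acc hl hr
    have hkt : ((k.toNat : Nat) : Int) = k := Int.toNat_of_nonneg (by omega)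
    by_cases h : left ≤ right
    · rw [pvA_loop, if_pos h]
      rw [pvChunks, if_pos (by omega : left + 1 ≤ right + 1)]
      simp only
      rw [pv_fwd_chunk n k.toNat left right acc hl hr]
      set T1 := max 0 (min ((k.toNat : Nat) : Int) (right - left + 1)) with hT1def
      have hT1 : T1 = min k (right + 1 - (left + 1) + 1) := by rw [hT1def, hkt]; omega
      have hT1le : T1 ≤ right - left + 1 := by omega
      have hT1ge : 0 ≤ T1 := by omega
      simp only
      rw [pv_bwd_chunk n k.toNat (left + T1) right _ (by omega) hr]
      set T2 := max 0 (min ((k.toNat : Nat) : Int) (right - (left + T1) + 1)) with hT2def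
      have hT2 : T2 = min k (right + 1 - (left + 1 + min k (right + 1 - (left + 1) + 1)) + 1) := by
        rw [hT2def, hkt]; omega
      rw [ih (left + T1) (right - T2) _ (by omega) (by omega)]
      have e1 : left + 1 + min k (right + 1 - (left + 1) + 1) = left + T1 + 1 := by omega
      have e2 : right + 1 - T2 = right - T2 + 1 := by ring
      rw [← hT2, e1, e2]
      have e3 : left + 1 + T1 = left + T1 + 1 := by ring
      rw [e3]
    · rw [pvA_loop, if_neg h, pvChunks, if_neg (by omega : ¬ (left + 1 ≤ right + 1))]

-- Python divmod for a positive divisor: floordiv (q*k + r) k = q, mod = r when 0 ≤ r < k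
theorem pv_divmod (k q r : Int) (hk : 1 ≤ k) (hr0 : 0 ≤ r) (hrk : r < k) :
    PySem.Int.floordiv (q * k + r) k = q ∧ PySem.Int.mod (q * k + r) k = r := by
  have hd : PySem.Int.floordiv (q * k + r) k = q := by
    rw [PySem.Int.floordiv_eq_iff_of_pos (by omega)]
    constructor <;> nlinarith
  refine ⟨hd, ?_⟩
  have h := PySem.Int.floordiv_mul_add_mod (q * k + r) k
  rw [hd] at h
  linarith

-- the closed-form body on an even chunk: index 2*m*k + r, 0 ≤ r < k
theorem pv_body_even (n k m r : Int) (hk : 1 ≤ k) (hr0 : 0 ≤ r) (hrk : r < k) :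
    pvB_body n k (2 * m * k + r) = m * k + r + 1 := by
  obtain ⟨hd, hm⟩ := pv_divmod k (2 * m) r hk hr0 hrk
  obtain ⟨hd2, hm2⟩ := pv_divmod 2 m 0 (by omega) le_rfl (by omega)
  simp only [pvB_body]
  rw [show 2 * m * k + r = (2 * m) * k + r by ring, hd, hm,
    show (2 : Int) * m = m * 2 + 0 by ring, hd2, hm2]
  simp

-- the closed-form body on an odd chunk: index 2*m*k + k + j, 0 ≤ j < k
theorem pv_body_odd (n k m j : Int) (hk : 1 ≤ k) (hj0 : 0 ≤ j) (hjk : j < k) :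
    pvB_body n k (2 * m * k + k + j) = n - m * k - j := by
  obtain ⟨hd, hm⟩ := pv_divmod k (2 * m + 1) j hk hj0 hjk
  obtain ⟨hd2, hm2⟩ := pv_divmod 2 m 1 (by omega) (by omega) (by omega)
  simp only [pvB_body]
  rw [show 2 * m * k + k + j = (2 * m + 1) * k + j by ring, hd, hm,
    show (2 : Int) * m + 1 = m * 2 + 1 by ring, hd2, hm2]
  simp

-- the body maps an even index block onto one ascending value chunk
theorem pv_front_map (n k m t : Int) (hk : 1 ≤ k) (htk : t ≤ k) :
    (PySem.List.pyRange (2 * m * k) (2 * m * k + t) 1).map (pvB_body n k)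
      = PySem.List.pyRange (m * k + 1) (m * k + 1 + t) 1 := by
  rw [PySem.List.pyRange_one, PySem.List.pyRange_one,
    show 2 * m * k + t - 2 * m * k = t by ring,
    show m * k + 1 + t - (m * k + 1) = t by ring,
    List.map_map]
  apply List.map_congr_left
  intro j hj
  rw [List.mem_range] at hj
  have hjt : (j : Int) < t := by omega
  simp only [Function.comp_apply]
  rw [pv_body_even n k m j hk (by positivity) (by omega)]
  ring

-- the body maps an odd index block onto one descending value chunk
theorem pv_back_map (n k m t : Int) (hk : 1 ≤ k) (htk : t ≤ k) :
    (PySem.List.pyRange (2 * m * k + k) (2 * m * k + k + t) 1).map (pvB_body n k)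
      = PySem.List.pyRange (n - m * k) (n - m * k - t) (-1) := by
  rw [PySem.List.pyRange_one, PySem.List.pyRange_neg_one,
    show 2 * m * k + k + t - (2 * m * k + k) = t by ring,
    show n - m * k - (n - m * k - t) = t by ring,
    List.map_map]
  apply List.map_congr_left
  intro j hj
  rw [List.mem_range] at hj
  have hjt : (j : Int) < t := by omega
  simp only [Function.comp_apply]
  rw [pv_body_odd n k m j hk (by positivity) (by omega)]

-- the chunk loop, started at the m-th round, produces exactly the closed-form map of the remaining indices
theorem pv_chunks_map (n k : Int) (hk : 1 ≤ k) : ∀ (fuel : Nat) (m : Int) (acc : List Int),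
    0 ≤ m → n - 2 * m * k < (fuel : Int) →
    pvChunks k fuel (m * k + 1) (n - m * k) acc
      = acc ++ (PySem.List.pyRange (2 * m * k) n 1).map (pvB_body n k) := by
  intro fuel
  induction fuel with
  | zero =>
    intro m acc hm hf
    have hle : n ≤ 2 * m * k := by omega
    rw [pvChunks, PySem.List.pyRange_one_eq_nil hle]
    simp
  | succ fuel ih =>
    intro m acc hm hf
    have hlin : 2 * m * k = m * k + m * k := by ring
    by_cases h : m * k + 1 ≤ n - m * k
    · rw [pvChunks, if_pos h]
      simp only
      by_cases hfull : k ≤ n - 2 * m * k - k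
      · -- full round: both chunks have size k
        have e1 : min k (n - m * k - (m * k + 1) + 1) = k := by omega
        rw [e1]
        have e2 : min k (n - m * k - (m * k + 1 + k) + 1) = k := by omega
        rw [e2]
        rw [show m * k + 1 + k = (m + 1) * k + 1 by ring,
          show n - m * k - k = n - (m + 1) * k by ring]
        rw [ih (m + 1) _ (by omega) (by push_cast at hf ⊢; nlinarith)]
        have hsplit1 : PySem.List.pyRange (2 * m * k) n 1
            = PySem.List.pyRange (2 * m * k) (2 * m * k + k) 1
              ++ PySem.List.pyRange (2 * m * k + k) n 1 := by
          rw [← PySem.List.pyRange_one_append] <;> omega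
        have hsplit2 : PySem.List.pyRange (2 * m * k + k) n 1
            = PySem.List.pyRange (2 * m * k + k) (2 * m * k + k + k) 1
              ++ PySem.List.pyRange (2 * m * k + k + k) n 1 := by
          rw [← PySem.List.pyRange_one_append] <;> omega
        rw [hsplit1, hsplit2, List.map_append, List.map_append]
        have hf1 := pv_front_map n k m k hk le_rfl
        have hb1 := pv_back_map n k m k hk le_rfl
        rw [hf1, hb1, show 2 * m * k + k + k = 2 * (m + 1) * k by ring]
        simp only [List.append_assoc]
        rw [show (m + 1) * k + 1 = m * k + 1 + k by ring,
          show n - (m + 1) * k = n - m * k - k by ring]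
      · -- terminal round: the round consumes everything that is left
        set t1 := min k (n - m * k - (m * k + 1) + 1) with ht1def
        set t2 := min k (n - m * k - (m * k + 1 + t1) + 1) with ht2def
        have ht10 : 0 ≤ t1 := by omega
        have ht1k : t1 ≤ k := by omega
        have ht20 : 0 ≤ t2 := by omega
        have ht2k : t2 ≤ k := by omega
        have hsum : t1 + t2 = n - 2 * m * k := by omega
        have hstop : ¬ (m * k + 1 + t1 ≤ n - m * k - t2) := by omega
        have hrec : ∀ f : Nat, pvChunks k f (m * k + 1 + t1) (n - m * k - t2)
            (acc ++ PySem.List.pyRange (m * k + 1) (m * k + 1 + t1) 1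
              ++ PySem.List.pyRange (n - m * k) (n - m * k - t2) (-1))
            = acc ++ PySem.List.pyRange (m * k + 1) (m * k + 1 + t1) 1
              ++ PySem.List.pyRange (n - m * k) (n - m * k - t2) (-1) := by
          intro f
          cases f with
          | zero => rfl
          | succ f => rw [pvChunks, if_neg hstop]
        rw [hrec fuel]
        have hsplit : PySem.List.pyRange (2 * m * k) n 1
            = PySem.List.pyRange (2 * m * k) (2 * m * k + t1) 1
              ++ PySem.List.pyRange (2 * m * k + t1) n 1 := by
          rw [← PySem.List.pyRange_one_append] <;> omega
        rw [hsplit, List.map_append, pv_front_map n k m t1 hk ht1k]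
        by_cases ht2z : t2 = 0
        · rw [ht2z, PySem.List.pyRange_one_eq_nil (by omega : n ≤ 2 * m * k + t1)]
          have : PySem.List.pyRange (n - m * k) (n - m * k - 0) (-1) = [] :=
            PySem.List.pyRange_neg_one_eq_nil (by omega)
          rw [this]
          simp
        · have e1 : t1 = k := by omega
          rw [e1]
          have hn : PySem.List.pyRange (2 * m * k + k) n 1
              = PySem.List.pyRange (2 * m * k + k) (2 * m * k + k + t2) 1 := by
            have hne : n = 2 * m * k + k + t2 := by omega
            rw [← hne]
          rw [hn, pv_back_map n k m t2 hk ht2k]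
          simp [List.append_assoc]
    · rw [pvChunks, if_neg h,
        PySem.List.pyRange_one_eq_nil (by omega : n ≤ 2 * m * k)]
      simp

-- ===== VERDICT (by name: the statement is the Claim_ definition above) =====
theorem generate_k_zigzag_spec : Claim_equal_generate_k_zigzag := by
  intro n k _ hpre
  unfold Spec_generate_k_zigzag generate_k_zigzag generate_k_zigzag_alt
  rw [PySem.List.foldl_append_singleton_eq_map]
  by_cases hk : 1 ≤ k
  · rw [pv_loop_eq n k hk (n.toNat + 1) 0 (n - 1) [] le_rfl (by omega)]
    have h0 : (0 : Int) * k + 1 = 0 + 1 := by ring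
    have := pv_chunks_map n k hk (n.toNat + 1) 0 [] le_rfl (by push_cast; omega)
    simpa using this
  · rcases hpre with hn | hk'
    · have h0 : n.toNat = 0 := by omega
      rw [h0]
      rw [pvA_loop, if_neg (by omega : ¬ ((0 : Int) ≤ n - 1))]
      rw [PySem.List.pyRange_one_eq_nil (by omega : n ≤ 0)]
      simp
    · omega
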